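-- pv_equiv track=rewrite | github.com/wahchachaps/CPCT-Dashboard | app.py | match_month_in_name
-- ===== SOURCE A (Python) =====
-- MONTH_ALIASES = [
--     ("january", 1), ("jan", 1),
--     ("february", 2), ("feb", 2), ("febuary", 2), ("feburary", 2), ("febuarary", 2),
--     ("march", 3), ("mar", 3),
--     ("april", 4), ("apr", 4),
--     ("may", 5),
--     ("june", 6), ("jun", 6),
--     ("july", 7), ("jul", 7),
--     ("august", 8), ("aug", 8),
--     ("september", 9), ("sep", 9), ("sept", 9),
--     ("october", 10), ("oct", 10),
--     ("november", 11), ("nov", 11),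
--     ("december", 12), ("dec", 12)
-- ]
--
-- MONTH_NAMES = [
--     "January", "February", "March", "April", "May", "June",
--     "July", "August", "September", "October", "November", "December"
-- ]
--
-- def match_month_in_name(name, target_year=None, target_month=None):
--     if not target_year and not target_month:
--         return False
--     lowered = str(name or "").lower()
--     if target_year and str(target_year) not in lowered:
--         return False
--     if target_month:
--         month_name = MONTH_NAMES[target_month - 1].lower() if 1 <= target_month <= 12 else ""
--         if month_name and month_name in lowered:
--             return True
--         for alias, month_num in MONTH_ALIASES:
--             if month_num == target_month and alias in lowered:
--                 return True
--         return False
--     return True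
-- ===== SOURCE B (Python) =====
-- MONTH_ALIASES = [
--     ("january", 1), ("jan", 1),
--     ("february", 2), ("feb", 2), ("febuary", 2), ("feburary", 2), ("febuarary", 2),
--     ("march", 3), ("mar", 3),
--     ("april", 4), ("apr", 4),
--     ("may", 5),
--     ("june", 6), ("jun", 6),
--     ("july", 7), ("jul", 7),
--     ("august", 8), ("aug", 8),
--     ("september", 9), ("sep", 9), ("sept", 9),
--     ("october", 10), ("oct", 10),
--     ("november", 11), ("nov", 11),
--     ("december", 12), ("dec", 12)
-- ]
--
-- # Aliases grouped once by month number; the full month name is already the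
-- # first alias of each month, so no separate full-name check is needed.
-- BY_MONTH = {}
-- for _alias, _num in MONTH_ALIASES:
--     BY_MONTH.setdefault(_num, []).append(_alias)
--
--
-- def match_month_in_name(name, target_year=None, target_month=None):
--     lowered = str(name or "").lower()
--     year_ok = (not target_year) or (str(target_year) in lowered)
--     month_ok = (not target_month) or any(
--         alias in lowered for alias in BY_MONTH.get(target_month, [])
--     )
--     return bool(target_year or target_month) and year_ok and month_ok
-- ===== Notes on version B (the rewrite author's own statement) =====
-- stated objective: simpler
-- what changed: Replaces the early-return chain, the separate MONTH_NAMES full-name test and the inner scan over the flat alias table by a module-level BY_MONTH grouping dict built once plus a single boolean formula (truthy-guard && year_ok && month_ok); the full name is the first grouped alias, so the MONTH_NAMES table disappears.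
import Mathlib
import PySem

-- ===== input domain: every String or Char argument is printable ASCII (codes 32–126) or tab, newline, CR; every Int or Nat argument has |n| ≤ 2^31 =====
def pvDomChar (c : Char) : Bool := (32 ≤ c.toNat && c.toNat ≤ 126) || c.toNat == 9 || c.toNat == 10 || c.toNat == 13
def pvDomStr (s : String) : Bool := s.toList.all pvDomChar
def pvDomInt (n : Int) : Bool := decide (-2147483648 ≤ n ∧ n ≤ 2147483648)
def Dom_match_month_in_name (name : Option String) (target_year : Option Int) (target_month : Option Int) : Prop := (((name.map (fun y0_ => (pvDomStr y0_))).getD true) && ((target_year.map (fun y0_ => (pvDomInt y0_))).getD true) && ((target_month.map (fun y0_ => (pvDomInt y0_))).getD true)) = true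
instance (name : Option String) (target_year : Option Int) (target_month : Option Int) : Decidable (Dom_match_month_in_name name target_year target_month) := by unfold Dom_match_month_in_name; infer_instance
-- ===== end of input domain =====

-- B replaces A's early-return chain, MONTH_NAMES full-name test and inner alias scan by a
-- BY_MONTH grouping dict built once and a single boolean formula (objective: simpler).

-- ===== PORT A =====
def MONTH_ALIASES : List (String × Int) := [
  ("january", 1), ("jan", 1),
  ("february", 2), ("feb", 2), ("febuary", 2), ("feburary", 2), ("febuarary", 2),
  ("march", 3), ("mar", 3),
  ("april", 4), ("apr", 4),
  ("may", 5),
  ("june", 6), ("jun", 6),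
  ("july", 7), ("jul", 7),
  ("august", 8), ("aug", 8),
  ("september", 9), ("sep", 9), ("sept", 9),
  ("october", 10), ("oct", 10),
  ("november", 11), ("nov", 11),
  ("december", 12), ("dec", 12)]

def MONTH_NAMES : List String := [
  "January", "February", "March", "April", "May", "June",
  "July", "August", "September", "October", "November", "December"]

-- Python truthiness of an Optional[int]: None and 0 are falsy
def pyTruthy (o : Option Int) : Bool := !(o.getD 0 == 0)

-- the 'for alias, month_num in MONTH_ALIASES: if … return True' loop (early return)
def aliasLoop (tm : Int) (lowered : String) : List (String × Int) → Bool
  | [] => false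
  | (alias_, num) :: rest =>
      if num == tm && PySem.Str.isIn alias_ lowered then true else aliasLoop tm lowered rest

-- the body of A's 'if target_month:' branch, verbatim
def monthBlock (m : Int) (lowered : String) : Bool :=
  let month_name := if 1 ≤ m ∧ m ≤ 12 then PySem.Str.lower (PySem.List.pyGetD MONTH_NAMES (m - 1) "") else ""
  if month_name != "" && PySem.Str.isIn month_name lowered then true
  else aliasLoop m lowered MONTH_ALIASES

def match_month_in_name (name : Option String) (target_year : Option Int) (target_month : Option Int) : Bool :=
  if !pyTruthy target_year && !pyTruthy target_month then false
  else
    let lowered := PySem.Str.lower (name.getD "")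
    if pyTruthy target_year && !(PySem.Str.isIn (PySem.Int.toStr (target_year.getD 0)) lowered) then false
    else if pyTruthy target_month then monthBlock (target_month.getD 0) lowered
    else true

-- ===== PORT B =====
-- BY_MONTH = {}; for alias, num in MONTH_ALIASES: BY_MONTH.setdefault(num, []).append(alias)
def BY_MONTH : PySem.Dict Int (List String) :=
  MONTH_ALIASES.foldl (fun d p => PySem.Dict.modify d p.2 [] (fun l => l ++ [p.1])) PySem.Dict.empty

def match_month_in_name_alt (name : Option String) (target_year : Option Int) (target_month : Option Int) : Bool :=
  let lowered := PySem.Str.lower (name.getD "")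
  let year_ok := !pyTruthy target_year || PySem.Str.isIn (PySem.Int.toStr (target_year.getD 0)) lowered
  let month_ok := !pyTruthy target_month ||
    (PySem.Dict.getD BY_MONTH (target_month.getD 0) []).any (fun a => PySem.Str.isIn a lowered)
  (pyTruthy target_year || pyTruthy target_month) && year_ok && month_ok

-- ===== PRECONDITION & SPEC =====
def Spec_match_month_in_name (name : Option String) (target_year : Option Int) (target_month : Option Int) (out : Bool) : Prop := out = match_month_in_name_alt name target_year target_month
instance (name : Option String) (target_year : Option Int) (target_month : Option Int) (out : Bool) : Decidable (Spec_match_month_in_name name target_year target_month out) := by unfold Spec_match_month_in_name; infer_instance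

-- ===== CLAIM (what is proved, stated in full; the proofs are below) =====
def Claim_equal_match_month_in_name : Prop := ∀ (name : Option String) (target_year : Option Int) (target_month : Option Int), Dom_match_month_in_name name target_year target_month → Spec_match_month_in_name name target_year target_month (match_month_in_name name target_year target_month)

-- ===== LEMMAS AND PROOFS =====

-- the early-return alias scan is 'any' over the aliases of the target month
lemma aliasLoop_eq_any (m : Int) (low : String) (l : List (String × Int)) :
    aliasLoop m low l = ((l.filter (fun p => p.2 == m)).map (·.1)).any (fun a => PySem.Str.isIn a low) := by
  induction l with
  | nil => rfl
  | cons p rest ih =>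
    obtain ⟨a, n⟩ := p
    by_cases hn : n == m
    · cases hlow : PySem.Str.isIn a low <;> simp [aliasLoop, hn, ih]
    · simp [aliasLoop, hn, ih]

-- the grouping fold's lookup is the filtered alias list
lemma getD_group (l : List (String × Int)) (d : PySem.Dict Int (List String)) (m : Int) :
    (l.foldl (fun d p => PySem.Dict.modify d p.2 [] (fun v => v ++ [p.1])) d).getD m [] =
      d.getD m [] ++ ((l.filter (fun p => p.2 == m)).map (·.1)) := by
  induction l generalizing d with
  | nil => simp
  | cons p rest ih =>
    by_cases h : p.2 = m
    · simp [List.foldl_cons, ih, h]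
    · have h' : ¬ m = p.2 := fun e => h e.symm
      simp [List.foldl_cons, ih, PySem.Dict.getD_modify, h, h']

-- A's month block (full-name test, then alias scan) equals B's lookup in the grouping dict
lemma month_block_eq (m : Int) (low : String) :
    monthBlock m low = (PySem.Dict.getD BY_MONTH m []).any (fun a => PySem.Str.isIn a low) := by
  unfold monthBlock
  have hBM : PySem.Dict.getD BY_MONTH m [] = (MONTH_ALIASES.filter (fun p => p.2 == m)).map (·.1) := by
    simpa using getD_group MONTH_ALIASES PySem.Dict.empty m
  have e1 : PySem.Str.lower "January" = "january" := by decide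
  have e2 : PySem.Str.lower "February" = "february" := by decide
  have e3 : PySem.Str.lower "March" = "march" := by decide
  have e4 : PySem.Str.lower "April" = "april" := by decide
  have e5 : PySem.Str.lower "May" = "may" := by decide
  have e6 : PySem.Str.lower "June" = "june" := by decide
  have e7 : PySem.Str.lower "July" = "july" := by decide
  have e8 : PySem.Str.lower "August" = "august" := by decide
  have e9 : PySem.Str.lower "September" = "september" := by decide
  have e10 : PySem.Str.lower "October" = "october" := by decide
  have e11 : PySem.Str.lower "November" = "november" := by decide
  have e12 : PySem.Str.lower "December" = "december" := by decide
  rw [hBM]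
  by_cases h : 1 ≤ m ∧ m ≤ 12
  · obtain ⟨h1, h2⟩ := h
    interval_cases m <;>
      simp [MONTH_ALIASES, MONTH_NAMES, aliasLoop_eq_any, PySem.List.pyGetD, PySem.List.pyGet?,
            PySem.List.pyIdx?, e1, e2, e3, e4, e5, e6, e7, e8, e9, e10, e11, e12,
            h1, h2, Bool.or_self_left]
  · simp [h, aliasLoop_eq_any]

-- ===== VERDICT (by name: the statement is the Claim_ definition above) =====
theorem match_month_in_name_spec : Claim_equal_match_month_in_name := by
  intro name ty tm _
  unfold Spec_match_month_in_name match_month_in_name match_month_in_name_alt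
  cases hty : pyTruthy ty <;> cases htm : pyTruthy tm
  · simp
  · simp [month_block_eq]
  · simp
  · simp [month_block_eq]
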